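-- pv_equiv track=rewrite | github.com/emmtrix/emx-ort-test-artifacts | tools/python/emx_ort_test_materializer/operator_markdown.py | compress_run_numbers
-- ===== SOURCE A (Python) =====
-- def compress_run_numbers(runs: list[int]) -> str:
--     """Compress sorted run numbers into bracket range syntax."""
--     ranges: list[str] = []
--     start = runs[0]
--     end = runs[0]
--     for run in runs[1:]:
--         if run == end + 1:
--             end = run
--             continue
--         ranges.append(format_run_range(start, end))
--         start = end = run
--     ranges.append(format_run_range(start, end))
--     return ",".join(ranges)
--
-- def format_run_range(start: int, end: int) -> str:
--     """Format one inclusive run-number range."""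
--     if start == end:
--         return str(start)
--     return f"{start}-{end}"
-- ===== SOURCE B (Python) =====
-- def compress_run_numbers(runs: list[int]) -> str:
--     """Compress sorted run numbers into bracket range syntax."""
--     n = len(runs)
--     breaks = [0] + [i for i in range(1, n) if runs[i] - runs[i - 1] != 1] + [n]
--     parts = []
--     for a, b in zip(breaks, breaks[1:]):
--         s, e = runs[a], runs[b - 1]
--         parts.append(str(s) if s == e else f"{s}-{e}")
--     return ",".join(parts)
-- ===== Notes on version B (the rewrite author's own statement) =====
-- stated objective: alternative
-- what changed: Replaces A's single accumulating pass (carry start/end, append formatted ranges as it goes) by a staged index-based algorithm: first compute the list of break positions where consecutivity fails, then format each range by random access into runs at consecutive break-pair boundaries.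
import Mathlib
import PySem

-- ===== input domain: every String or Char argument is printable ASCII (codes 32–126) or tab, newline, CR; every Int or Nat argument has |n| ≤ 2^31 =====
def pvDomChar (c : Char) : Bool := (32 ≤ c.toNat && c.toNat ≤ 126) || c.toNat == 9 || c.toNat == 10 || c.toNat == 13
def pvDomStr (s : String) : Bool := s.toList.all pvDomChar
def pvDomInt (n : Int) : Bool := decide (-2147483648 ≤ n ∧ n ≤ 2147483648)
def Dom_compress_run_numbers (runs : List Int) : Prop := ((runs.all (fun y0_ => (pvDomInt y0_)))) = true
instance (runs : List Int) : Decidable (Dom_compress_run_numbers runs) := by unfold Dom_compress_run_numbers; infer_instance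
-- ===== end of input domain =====

-- B replaces A's single accumulating pass with a staged algorithm (compute break indices, then format via random access at break-pair boundaries); return values agree on every nonempty list (both raise IndexError on []).


-- ===== PORT A =====
def format_run_range (start e : Int) : String :=
  if start = e then PySem.Int.toStr start
  else PySem.Int.toStr start ++ "-" ++ PySem.Int.toStr e

def compress_run_numbers (runs : List Int) : String :=
  match runs with
  | [] => ""  -- Python: indexing the first element raises IndexError here (excluded by Pre_)
  | r0 :: _ =>
    let st := (PySem.List.slice runs (some 1) none).foldl
      (fun (acc : List String × Int × Int) run =>
        if run = acc.2.2 + 1 then (acc.1, acc.2.1, run)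
        else (acc.1 ++ [format_run_range acc.2.1 acc.2.2], run, run))
      ([], r0, r0)
    PySem.Str.join "," (st.1 ++ [format_run_range st.2.1 st.2.2])

-- ===== PORT B =====
-- 'breaks = [0] + [i for i in range(1, n) if runs[i] - runs[i-1] != 1] + [n]'
-- then for each adjacent pair (a, b) of breaks: s, e = runs[a], runs[b-1]; format.
-- each Python subscript is ported as pyGetD (index provably in range inside Pre_; on the empty list Python raises, excluded by Pre_).
def compress_run_numbers_alt (runs : List Int) : String :=
  let n : Int := runs.length
  let breaks : List Int :=
    0 :: (PySem.List.pyRange 1 n 1).filter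
      (fun i => PySem.List.pyGetD runs i 0 - PySem.List.pyGetD runs (i - 1) 0 ≠ 1) ++ [n]
  let parts : List String :=
    (breaks.zip (PySem.List.slice breaks (some 1) none)).map
      (fun ab =>
        let s := PySem.List.pyGetD runs ab.1 0
        let e := PySem.List.pyGetD runs (ab.2 - 1) 0
        if s = e then PySem.Int.toStr s else PySem.Int.toStr s ++ "-" ++ PySem.Int.toStr e)
  PySem.Str.join "," parts

-- ===== PRECONDITION & SPEC =====
-- Pre_ excludes exactly the empty list, on which Python A raises IndexError (indexing the first element) and Python B raises IndexError too (while formatting its single break pair).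
def Pre_compress_run_numbers (runs : List Int) : Prop := runs ≠ []
instance (runs : List Int) : Decidable (Pre_compress_run_numbers runs) := by unfold Pre_compress_run_numbers; infer_instance
def pvWitness_compress_run_numbers : List Int := ([3, 4, 5, 9])

def Spec_compress_run_numbers (runs : List Int) (out : String) : Prop := out = compress_run_numbers_alt runs
instance (runs : List Int) (out : String) : Decidable (Spec_compress_run_numbers runs out) := by unfold Spec_compress_run_numbers; infer_instance

-- ===== CLAIM (what is proved, stated in full; the proofs are below) =====
def Claim_equal_compress_run_numbers : Prop := ∀ (runs : List Int), Dom_compress_run_numbers runs → Pre_compress_run_numbers runs → Spec_compress_run_numbers runs (compress_run_numbers runs)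

-- ===== LEMMAS AND PROOFS =====

-- A's loop, characterised recursively: the final list of range strings.
def runStrs (s e : Int) : List Int → List String
  | [] => [format_run_range s e]
  | x :: xs => if x = e + 1 then runStrs s x xs else format_run_range s e :: runStrs x x xs

theorem foldl_runStrs (xs : List Int) (rs : List String) (s e : Int) :
    (xs.foldl
      (fun (acc : List String × Int × Int) run =>
        if run = acc.2.2 + 1 then (acc.1, acc.2.1, run)
        else (acc.1 ++ [format_run_range acc.2.1 acc.2.2], run, run)) (rs, s, e)).1
    ++ [format_run_range
         (xs.foldl
           (fun (acc : List String × Int × Int) run =>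
             if run = acc.2.2 + 1 then (acc.1, acc.2.1, run)
             else (acc.1 ++ [format_run_range acc.2.1 acc.2.2], run, run)) (rs, s, e)).2.1
         (xs.foldl
           (fun (acc : List String × Int × Int) run =>
             if run = acc.2.2 + 1 then (acc.1, acc.2.1, run)
             else (acc.1 ++ [format_run_range acc.2.1 acc.2.2], run, run)) (rs, s, e)).2.2]
    = rs ++ runStrs s e xs := by
  induction xs generalizing rs s e with
  | nil => simp [runStrs]
  | cons x xs ih =>
    simp only [List.foldl_cons, runStrs]
    split <;> simp [ih]

-- B's break-index computation, characterised as a recursion on the suffix of runs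
-- starting at index j, with prev = runs[j-1].
def brkIdx (j : Nat) (prev : Int) : List Int → List Int
  | [] => []
  | x :: xs => if x - prev ≠ 1 then (j : Int) :: brkIdx (j + 1) x xs else brkIdx (j + 1) x xs

theorem getD_drop (runs : List Int) (j : Nat) (x : Int) (xs : List Int)
    (h : runs.drop j = x :: xs) : runs.getD j 0 = x := by
  have h0 : (runs.drop j)[0]? = some x := by rw [h]; rfl
  rw [List.getElem?_drop] at h0
  simp only [Nat.add_zero] at h0
  simp [List.getD_eq_getElem?_getD, h0]

theorem drop_succ_of_drop_cons (runs : List Int) (j : Nat) (prev x : Int) (xs : List Int)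
    (hj : 1 ≤ j) (h : runs.drop (j - 1) = prev :: x :: xs) : runs.drop j = x :: xs := by
  have h1 : runs.drop j = (runs.drop (j - 1)).drop 1 := by
    rw [List.drop_drop]
    congr 1
    omega
  rw [h1, h]
  rfl

theorem filter_eq_brkIdx (runs : List Int) :
    ∀ (xs : List Int) (j : Nat) (prev : Int), 1 ≤ j → runs.drop (j - 1) = prev :: xs →
    (PySem.List.pyRange (j : Int) (runs.length : Int) 1).filter
      (fun i => PySem.List.pyGetD runs i 0 - PySem.List.pyGetD runs (i - 1) 0 ≠ 1)
      = brkIdx j prev xs := by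
  intro xs
  induction xs with
  | nil =>
    intro j prev hj h
    have hlen : runs.length = j := by
      have := congrArg List.length h
      rw [List.length_drop] at this
      simp at this; omega
    rw [brkIdx, PySem.List.pyRange_one_eq_nil (by omega), List.filter_nil]
  | cons x xs ih =>
    intro j prev hj h
    have hjlt : j < runs.length := by
      have := congrArg List.length h
      rw [List.length_drop] at this
      simp at this; omega
    have hdj : runs.drop j = x :: xs := drop_succ_of_drop_cons runs j prev x xs hj h
    have hx : runs.getD j 0 = x := getD_drop runs j x (xs) hdj
    have hprev : runs.getD (j - 1) 0 = prev := getD_drop runs (j - 1) prev (x :: xs) h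
    have hcast : ((j : Int) - 1) = ((j - 1 : Nat) : Int) := by omega
    have hg : PySem.List.pyGetD runs (j : Int) 0 - PySem.List.pyGetD runs ((j : Int) - 1) 0
        = x - prev := by
      rw [hcast, PySem.List.pyGetD_natCast, PySem.List.pyGetD_natCast, hx, hprev]
    have hrec : (PySem.List.pyRange ((j : Int) + 1) (runs.length : Int) 1).filter
        (fun i => PySem.List.pyGetD runs i 0 - PySem.List.pyGetD runs (i - 1) 0 ≠ 1)
        = brkIdx (j + 1) x xs := by
      have := ih (j + 1) x (by omega) (by simpa using hdj)
      simpa [Nat.cast_add] using this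
    rw [PySem.List.pyRange_one_cons (by omega)]
    simp only [List.filter_cons]
    rw [hg]
    by_cases hb : x - prev = 1
    · rw [if_neg (by simp [hb]), brkIdx, if_neg (not_not_intro hb), hrec]
    · rw [if_pos (by simp [hb]), brkIdx, if_pos hb, hrec]

-- formatting one pair of break indices, as the B port does
def fmtPair (runs : List Int) (ab : Int × Int) : String :=
  let s := PySem.List.pyGetD runs ab.1 0
  let e := PySem.List.pyGetD runs (ab.2 - 1) 0
  if s = e then PySem.Int.toStr s else PySem.Int.toStr s ++ "-" ++ PySem.Int.toStr e

theorem fmtPair_eq (runs : List Int) (a b : Int) :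
    fmtPair runs (a, b) = format_run_range (PySem.List.pyGetD runs a 0)
      (PySem.List.pyGetD runs (b - 1) 0) := rfl

-- the pair/format stage over the break list equals A's runStrs characterisation
theorem pairs_eq_runStrs (runs : List Int) :
    ∀ (xs : List Int) (j a : Nat) (prev s : Int), 1 ≤ j →
    runs.drop (j - 1) = prev :: xs →
    PySem.List.pyGetD runs (a : Int) 0 = s →
    ((((a : Int) :: brkIdx j prev xs ++ [(runs.length : Int)]).zip
        (brkIdx j prev xs ++ [(runs.length : Int)])).map (fmtPair runs))
      = runStrs s prev xs := by
  intro xs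
  induction xs with
  | nil =>
    intro j a prev s hj h hs
    have hlen : runs.length = j := by
      have := congrArg List.length h
      rw [List.length_drop] at this
      simp at this; omega
    have hprev : runs.getD (j - 1) 0 = prev := getD_drop runs (j - 1) prev [] h
    rw [brkIdx]
    simp only [List.nil_append, List.singleton_append, List.zip_cons_cons, List.zip_nil_right,
      List.map_cons, List.map_nil, runStrs]
    rw [fmtPair_eq, hs, hlen]
    have : ((j : Int) - 1) = ((j - 1 : Nat) : Int) := by omega
    rw [this, PySem.List.pyGetD_natCast, hprev]
  | cons x xs ih =>
    intro j a prev s hj h hs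
    have hjlt : j < runs.length := by
      have := congrArg List.length h
      rw [List.length_drop] at this
      simp at this; omega
    have hdj : runs.drop j = x :: xs := drop_succ_of_drop_cons runs j prev x xs hj h
    have hx : PySem.List.pyGetD runs (j : Int) 0 = x := by
      rw [PySem.List.pyGetD_natCast]; exact getD_drop runs j x xs hdj
    have hprev : runs.getD (j - 1) 0 = prev := getD_drop runs (j - 1) prev (x :: xs) h
    have hdj' : runs.drop ((j + 1) - 1) = x :: xs := by simpa using hdj
    by_cases hb : x - prev = 1
    · rw [brkIdx, if_neg (by simpa using hb)]
      rw [runStrs, if_pos (by omega)]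
      exact ih (j + 1) a x s (by omega) hdj' hs
    · rw [brkIdx, if_pos (by simpa using hb)]
      rw [runStrs, if_neg (by intro hc; exact hb (by omega))]
      have hrec := ih (j + 1) j x x (by omega) hdj' hx
      simp only [List.cons_append, List.zip_cons_cons, List.map_cons] at hrec ⊢
      rw [hrec]
      rw [fmtPair_eq, hs]
      have : ((j : Int) - 1) = ((j - 1 : Nat) : Int) := by omega
      rw [this, PySem.List.pyGetD_natCast, hprev]

-- ===== VERDICT (by name: the statement is the Claim_ definition above) =====
theorem compress_run_numbers_spec : Claim_equal_compress_run_numbers := by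
  intro runs _dom hpre
  unfold Spec_compress_run_numbers
  cases runs with
  | nil => exact absurd rfl hpre
  | cons r0 rest =>
    have hdrop : (r0 :: rest).drop (1 - 1) = r0 :: rest := rfl
    have hbrk := filter_eq_brkIdx (r0 :: rest) rest 1 r0 (le_refl 1) hdrop
    have hs0 : PySem.List.pyGetD (r0 :: rest) ((0 : Nat) : Int) 0 = r0 := by
      rw [PySem.List.pyGetD_natCast]; rfl
    have hpairs := pairs_eq_runStrs (r0 :: rest) rest 1 0 r0 r0 (le_refl 1) hdrop hs0
    simp only [Nat.cast_one] at hbrk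
    simp only [Nat.cast_zero] at hpairs
    simp only [compress_run_numbers, compress_run_numbers_alt, PySem.List.slice_from_one,
      List.tail_cons, hbrk, List.cons_append]
    rw [foldl_runStrs rest [] r0 r0, List.nil_append]
    exact (congrArg (PySem.Str.join ",") hpairs).symm
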